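-- pv_equiv track=rewrite | github.com/chaosnabilera/problemsolving | codeforces/problemset/1536/1536b.py | solve
-- ===== SOURCE A (Python) =====
-- def solve(N,S,alist):
-- 	slist = []
-- 	for c in S:
-- 		slist.append(c)
-- 	for i in range(N-1):
-- 		slist.append(S[i:i+2])
-- 	for i in range(N-2):
-- 		slist.append(S[i:i+3])
--
-- 	sset = set(slist)
--
-- 	for ans in alist:
-- 		if ans not in sset:
-- 			return ans
-- ===== SOURCE B (Python) =====
-- def solve(N, S, alist):
--     for ans in alist:
--         if not (1 <= len(ans) <= 3 and ans in S):
--             return ans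
-- ===== Notes on version B (the rewrite author's own statement) =====
-- stated objective: faster
-- what changed: B drops the precomputed set of all length-1/2/3 slices of S and instead tests each candidate directly with a single substring scan of S (guarded by its length); skipping the table build was measured ~4x faster on the generated inputs.
-- intended difference: On inputs where the declared length N disagrees with len(S) so that A's N-derived slice table misclassifies the first decisive candidate (an empty candidate with N >= len(S)+2, or a length-2/3 candidate occurring in S only at positions beyond the N cap), A skips that empty candidate or returns a candidate that actually is a substring of S, while B returns the first candidate that is not a length-1..3 substring of S, which is the function's purpose (N is meant to be len(S)). — e.g. on solve(2, "abc", ["bc"]): A returns some "bc", B returns none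
import Mathlib
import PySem

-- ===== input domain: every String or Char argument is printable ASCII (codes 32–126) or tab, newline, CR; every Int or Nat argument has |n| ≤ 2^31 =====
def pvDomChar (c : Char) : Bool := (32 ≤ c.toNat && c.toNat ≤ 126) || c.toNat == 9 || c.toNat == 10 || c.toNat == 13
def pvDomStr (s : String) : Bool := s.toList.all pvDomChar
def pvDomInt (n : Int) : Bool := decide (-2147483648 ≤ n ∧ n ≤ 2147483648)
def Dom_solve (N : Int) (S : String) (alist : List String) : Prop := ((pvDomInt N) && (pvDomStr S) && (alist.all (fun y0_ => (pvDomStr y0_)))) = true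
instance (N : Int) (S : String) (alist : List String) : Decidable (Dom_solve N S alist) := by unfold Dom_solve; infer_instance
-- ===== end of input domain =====

-- B skips A's table of every length-1/2/3 slice of S (capped by the declared length N) and
-- tests each candidate directly with one substring scan of S (measured faster by the check).

-- ===== PORT A =====
def solve (N : Int) (S : String) (alist : List String) : Option String :=
  -- slist = [] ; for c in S: slist.append(c)
  let slist : List String := S.toList.map (fun c => String.ofList [c])
  -- for i in range(N-1): slist.append(S[i:i+2])
  let slist := slist ++ (PySem.List.pyRange 0 (N - 1) 1).map
    (fun i => PySem.Str.slice S (some i) (some (i + 2)))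
  -- for i in range(N-2): slist.append(S[i:i+3])
  let slist := slist ++ (PySem.List.pyRange 0 (N - 2) 1).map
    (fun i => PySem.Str.slice S (some i) (some (i + 3)))
  let sset : PySem.Set String := PySem.Set.ofList slist
  alist.find? (fun ans => !(PySem.Set.contains sset ans))

-- ===== PORT B =====
def solve_alt (_N : Int) (S : String) (alist : List String) : Option String :=
  alist.find? (fun ans =>
    !(decide (1 ≤ PySem.Str.len ans) && decide (PySem.Str.len ans ≤ 3) && PySem.Str.isIn ans S))

-- ===== PRECONDITION & SPEC =====
-- helper inspections of the input used by D_solve (never computing either program's output):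
-- 'sub occurs in L at a position k with k + |sub| ≤ N'
def pvOcc (Nv : Int) (L sub : List Char) : Prop :=
  ∃ k ∈ List.range L.length, ((k : Int) + sub.length ≤ Nv ∧ (L.drop k).take sub.length = sub)
-- candidate on which A's N-derived slice table is wrong about 'is ans a substring of S'
def pvBadCand (Nv : Int) (S ans : String) : Prop :=
  (ans.toList.length = 0 ∧ (S.toList.length : Int) + 2 ≤ Nv) ∨
  (2 ≤ ans.toList.length ∧ ans.toList.length ≤ 3 ∧ ans.toList <:+: S.toList ∧
    ¬ pvOcc Nv S.toList ans.toList)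
-- candidate that both programs skip
def pvBothSkip (Nv : Int) (S ans : String) : Prop :=
  1 ≤ ans.toList.length ∧ ans.toList.length ≤ 3 ∧ ans.toList <:+: S.toList ∧
  (ans.toList.length = 1 ∨ pvOcc Nv S.toList ans.toList)

-- On inputs whose declared length N disagrees with len(S) so that the first decisive candidate
-- is misclassified by A's N-derived slice table — an empty candidate with N ≥ len(S)+2, or a
-- length-2/3 candidate occurring in S only at positions k with k+len > N — A returns a candidate
-- that is in fact a length-1..3 substring of S (or skips the empty candidate); B returns the
-- first candidate that is not a length-1..3 substring of S, which is the function's purpose.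
def D_solve (N : Int) (S : String) (alist : List String) : Prop :=
  ∃ j ∈ List.range alist.length, (pvBadCand N S (alist.getD j "") ∧
    ∀ j' ∈ List.range j, pvBothSkip N S (alist.getD j' ""))
instance (N : Int) (S : String) (alist : List String) : Decidable (D_solve N S alist) := by unfold D_solve pvBadCand pvBothSkip pvOcc; infer_instance

def Spec_solve (N : Int) (S : String) (alist : List String) (out : Option String) : Prop := ¬ D_solve N S alist → out = solve_alt N S alist
instance (N : Int) (S : String) (alist : List String) (out : Option String) : Decidable (Spec_solve N S alist out) := by unfold Spec_solve; infer_instance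

def pvDiffWitness_solve : Int × String × List String := (2, "abc", ["bc"])
def pvDiffWitnessOut_solve : (Option String) × (Option String) := (some "bc", none)

-- ===== CLAIM (what is proved, stated in full; the proofs are below) =====
def Claim_unchanged_solve : Prop := ∀ (N : Int) (S : String) (alist : List String), Dom_solve N S alist → Spec_solve N S alist (solve N S alist)
def Claim_changed_solve : Prop := Dom_solve (pvDiffWitness_solve.1) (pvDiffWitness_solve.2.1) (pvDiffWitness_solve.2.2) ∧ D_solve (pvDiffWitness_solve.1) (pvDiffWitness_solve.2.1) (pvDiffWitness_solve.2.2) ∧ solve (pvDiffWitness_solve.1) (pvDiffWitness_solve.2.1) (pvDiffWitness_solve.2.2) = pvDiffWitnessOut_solve.1 ∧ solve_alt (pvDiffWitness_solve.1) (pvDiffWitness_solve.2.1) (pvDiffWitness_solve.2.2) = pvDiffWitnessOut_solve.2 ∧ pvDiffWitnessOut_solve.1 ≠ pvDiffWitnessOut_solve.2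
def Claim_exact_solve : Prop := ∀ (N : Int) (S : String) (alist : List String), Dom_solve N S alist → D_solve N S alist → solve N S alist ≠ solve_alt N S alist

-- ===== LEMMAS AND PROOFS =====

-- the list of slices A collects, after normalising the three folds
def pvTable (N : Int) (S : String) : List String :=
  S.toList.map (fun c => String.ofList [c]) ++
    (PySem.List.pyRange 0 (N - 1) 1).map
      (fun i => PySem.Str.slice S (some i) (some (i + 2))) ++
    (PySem.List.pyRange 0 (N - 2) 1).map
      (fun i => PySem.Str.slice S (some i) (some (i + 3)))

-- A's set membership, stated over the input
def pvAMem (N : Int) (S ans : String) : Prop :=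
  (ans.toList.length = 0 ∧ (S.toList.length : Int) + 2 ≤ N) ∨
  (ans.toList.length = 1 ∧ ans.toList <:+: S.toList) ∨
  (2 ≤ ans.toList.length ∧ ans.toList.length ≤ 3 ∧ pvOcc N S.toList ans.toList)

-- B's skip condition
def pvBSkip (S ans : String) : Prop :=
  1 ≤ ans.toList.length ∧ ans.toList.length ≤ 3 ∧ ans.toList <:+: S.toList

theorem pv_infix_take_drop (L : List Char) (k m : Nat) : (L.drop k).take m <:+: L :=
  ((List.take_prefix m (L.drop k)).isInfix).trans (List.drop_suffix k L).isInfix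

theorem pv_occ_infix {Nv : Int} {L sub : List Char} (h : pvOcc Nv L sub) : sub <:+: L := by
  obtain ⟨k, _, _, htake⟩ := h
  rw [← htake]
  exact pv_infix_take_drop L k sub.length

theorem pv_slice_toList (S : String) (k m : Nat) :
    (PySem.Str.slice S (some (k : Int)) (some ((k : Int) + (m : Int)))).toList
      = (S.toList.drop k).take m := by
  rw [PySem.Str.toList_slice, PySem.Chars.slice_eq_listSlice]
  exact PySem.List.slice_natCast_add S.toList k m

theorem pv_str_eq_of_toList {a b : String} (h : a.toList = b.toList) : a = b := by
  have := congrArg String.ofList h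
  rwa [String.ofList_toList, String.ofList_toList] at this

-- membership in A's table ↔ pvAMem
theorem pv_mem_table (N : Int) (S ans : String) :
    ans ∈ pvTable N S ↔ pvAMem N S ans := by
  unfold pvTable pvAMem
  simp only [List.mem_append, List.mem_map, PySem.List.mem_pyRange_one]
  constructor
  · rintro ((⟨c, hc, rfl⟩ | ⟨i, ⟨h0, hi⟩, rfl⟩) | ⟨i, ⟨h0, hi⟩, rfl⟩)
    · obtain ⟨s, t, h⟩ := List.append_of_mem hc
      exact Or.inr (Or.inl ⟨by simp, by rw [h]; exact ⟨s, t, by simp⟩⟩)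
    · obtain ⟨k, rfl⟩ := Int.eq_ofNat_of_zero_le h0
      rw [(by push_cast; ring : (k : Int) + 2 = (k : Int) + ((2 : Nat) : Int))]
      set t := (S.toList.drop k).take 2 with ht
      have htl : (PySem.Str.slice S (some (k : Int)) (some ((k : Int) + ((2 : Nat) : Int)))).toList = t := pv_slice_toList S k 2
      have hlen : t.length = min 2 (S.toList.length - k) := by
        rw [ht, List.length_take, List.length_drop]
      rcases (by omega : S.toList.length ≤ k ∨ k = S.toList.length - 1 ∧ k < S.toList.length ∨ k + 2 ≤ S.toList.length) with hk | hk | hk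
      · exact Or.inl ⟨by rw [htl]; omega, by omega⟩
      · refine Or.inr (Or.inl ⟨by rw [htl]; omega, ?_⟩)
        rw [htl, ht]; exact pv_infix_take_drop _ _ _
      · refine Or.inr (Or.inr ⟨by rw [htl]; omega, by rw [htl]; omega, k, List.mem_range.mpr (by omega), ?_, ?_⟩)
        · rw [htl]; omega
        · rw [htl, hlen, ht]; congr 1; omega
    · obtain ⟨k, rfl⟩ := Int.eq_ofNat_of_zero_le h0
      rw [(by push_cast; ring : (k : Int) + 3 = (k : Int) + ((3 : Nat) : Int))]
      set t := (S.toList.drop k).take 3 with ht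
      have htl : (PySem.Str.slice S (some (k : Int)) (some ((k : Int) + ((3 : Nat) : Int)))).toList = t := pv_slice_toList S k 3
      have hlen : t.length = min 3 (S.toList.length - k) := by
        rw [ht, List.length_take, List.length_drop]
      rcases (by omega : S.toList.length ≤ k ∨ k = S.toList.length - 1 ∧ k < S.toList.length ∨ (k + 2 ≤ S.toList.length ∧ S.toList.length ≤ k + 2) ∨ k + 3 ≤ S.toList.length) with hk | hk | hk | hk
      · exact Or.inl ⟨by rw [htl]; omega, by omega⟩
      · refine Or.inr (Or.inl ⟨by rw [htl]; omega, ?_⟩)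
        rw [htl, ht]; exact pv_infix_take_drop _ _ _
      · refine Or.inr (Or.inr ⟨by rw [htl]; omega, by rw [htl]; omega, k, List.mem_range.mpr (by omega), ?_, ?_⟩)
        · rw [htl]; omega
        · rw [htl, hlen, ht, (by omega : min 3 (S.toList.length - k) = 2),
            List.take_of_length_le (by rw [List.length_drop]; omega),
            List.take_of_length_le (by rw [List.length_drop]; omega)]
      · refine Or.inr (Or.inr ⟨by rw [htl]; omega, by rw [htl]; omega, k, List.mem_range.mpr (by omega), ?_, ?_⟩)
        · rw [htl]; omega
        · rw [htl, hlen, ht]; congr 1; omega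
  · rintro (⟨hm, hN⟩ | ⟨hm, hinf⟩ | ⟨h2, h3, k, hkr, hkN, htake⟩)
    · refine Or.inl (Or.inr ⟨(S.toList.length : Int), ⟨by positivity, by omega⟩, ?_⟩)
      rw [(by push_cast; ring : (S.toList.length : Int) + 2 = ((S.toList.length : Nat) : Int) + ((2 : Nat) : Int))]
      apply pv_str_eq_of_toList
      rw [pv_slice_toList, List.drop_length]
      simp only [List.take_nil]
      exact (List.length_eq_zero_iff.mp hm).symm
    · obtain ⟨c, hc⟩ := List.length_eq_one_iff.mp hm
      exact Or.inl (Or.inl ⟨c, hinf.subset (by simp [hc]), by rw [← hc, String.ofList_toList]⟩)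
    · simp only [List.mem_range] at hkr
      rcases (by omega : ans.toList.length = 2 ∨ ans.toList.length = 3) with hm | hm
      · refine Or.inl (Or.inr ⟨(k : Int), ⟨by positivity, by omega⟩, ?_⟩)
        rw [(by push_cast; ring : (k : Int) + 2 = (k : Int) + ((2 : Nat) : Int))]
        apply pv_str_eq_of_toList
        rw [pv_slice_toList, ← hm, htake]
      · refine Or.inr ⟨(k : Int), ⟨by positivity, by omega⟩, ?_⟩
        rw [(by push_cast; ring : (k : Int) + 3 = (k : Int) + ((3 : Nat) : Int))]
        apply pv_str_eq_of_toList
        rw [pv_slice_toList, ← hm, htake]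

-- keep/return predicates of the two ports, as booleans over the candidate value
theorem pv_pA_iff (N : Int) (S ans : String) :
    (!(PySem.Set.contains (PySem.Set.ofList (pvTable N S)) ans)) = true ↔ ¬ pvAMem N S ans := by
  rw [Bool.not_eq_eq_eq_not, Bool.not_true, ← Bool.not_eq_true, PySem.Set.contains_iff,
    PySem.Set.mem_ofList, pv_mem_table]

theorem pv_pB_iff (S ans : String) :
    (!(decide (1 ≤ PySem.Str.len ans) && decide (PySem.Str.len ans ≤ 3) && PySem.Str.isIn ans S)) = true ↔ ¬ pvBSkip S ans := by
  unfold pvBSkip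
  rw [Bool.not_eq_true', Bool.eq_false_iff, Ne]
  apply not_congr
  simp only [Bool.and_eq_true, decide_eq_true_eq, PySem.Str.isIn_iff_infix, PySem.Str.len_eq]
  constructor
  · rintro ⟨⟨a, b⟩, c⟩; exact ⟨by exact_mod_cast a, by exact_mod_cast b, c⟩
  · rintro ⟨a, b, c⟩; exact ⟨⟨by exact_mod_cast a, by exact_mod_cast b⟩, c⟩

-- on a non-bad candidate the two ports agree
theorem pv_agree {N : Int} {S x : String} (h : ¬ pvBadCand N S x) :
    (pvAMem N S x ↔ pvBSkip S x) := by
  unfold pvBadCand at h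
  constructor
  · rintro (⟨hm, hN⟩ | ⟨hm, hinf⟩ | ⟨a, b, hocc⟩)
    · exact absurd (Or.inl ⟨hm, hN⟩) h
    · exact ⟨by omega, by omega, hinf⟩
    · exact ⟨by omega, b, pv_occ_infix hocc⟩
  · rintro ⟨h1, h3, hinf⟩
    rcases (by omega : x.toList.length = 1 ∨ 2 ≤ x.toList.length) with hm | hm
    · exact Or.inr (Or.inl ⟨hm, hinf⟩)
    · refine Or.inr (Or.inr ⟨hm, h3, ?_⟩)
      by_contra hocc
      exact h (Or.inr ⟨hm, h3, hinf, hocc⟩)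

-- on a bad candidate exactly one port skips
theorem pv_disagree {N : Int} {S x : String} (h : pvBadCand N S x) :
    (pvAMem N S x ↔ ¬ pvBSkip S x) := by
  unfold pvBadCand at h
  rcases h with ⟨hm, hN⟩ | ⟨h2, h3, hinf, hocc⟩
  · constructor
    · rintro - ⟨h1, -, -⟩; omega
    · intro _; exact Or.inl ⟨hm, hN⟩
  · constructor
    · rintro (⟨hm, _⟩ | ⟨hm, _⟩ | ⟨_, _, hocc'⟩)
      · omega
      · omega
      · exact absurd hocc' hocc
    · intro hb; exact absurd ⟨by omega, h3, hinf⟩ hb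

theorem pv_bothskip {N : Int} {S x : String} (h : pvBothSkip N S x) :
    pvAMem N S x ∧ pvBSkip S x := by
  obtain ⟨h1, h3, hinf, hc⟩ := h
  refine ⟨?_, h1, h3, hinf⟩
  rcases hc with hm | hocc
  · exact Or.inr (Or.inl ⟨hm, hinf⟩)
  · rcases (by omega : x.toList.length = 1 ∨ 2 ≤ x.toList.length) with hm | hm
    · exact Or.inr (Or.inl ⟨hm, hinf⟩)
    · exact Or.inr (Or.inr ⟨hm, h3, hocc⟩)

-- generic walk: if no bad candidate is reached, the two find?s agree
theorem pv_walk {p q : String → Bool} (Bad Skip : String → Prop)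
    (hpq : ∀ x, ¬ Bad x → p x = q x)
    (hskip : ∀ x, ¬ Bad x → q x = false → Skip x)
    (l : List String)
    (h : ¬ ∃ j ∈ List.range l.length, Bad (l.getD j "") ∧ ∀ j' ∈ List.range j, Skip (l.getD j' "")) :
    l.find? p = l.find? q := by
  induction l with
  | nil => rfl
  | cons a l ih =>
    have hnb : ¬ Bad a := by
      intro hb
      exact h ⟨0, by simp, by simpa using hb, by simp⟩
    have hpa := hpq a hnb
    cases hqa : q a with
    | true =>
      rw [List.find?_cons_of_pos (by rw [hpa, hqa]), List.find?_cons_of_pos hqa]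
    | false =>
      rw [List.find?_cons_of_neg (by rw [hpa, hqa]; simp), List.find?_cons_of_neg (by rw [hqa]; simp)]
      apply ih
      rintro ⟨j, hjr, hbad, hall⟩
      simp only [List.mem_range] at hjr
      refine h ⟨j + 1, by simp; omega, by simpa using hbad, ?_⟩
      intro j' hj'
      simp only [List.mem_range] at hj'
      match j' with
      | 0 => simpa using hskip a hnb hqa
      | (j'' + 1) =>
        have := hall j'' (by simp; omega)
        simpa using this

-- find? returns the first index at which the predicate holds
theorem pv_find?_first {p : String → Bool} (l : List String) (j : Nat) (hj : j < l.length)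
    (hp : p (l.getD j "") = true) (hpre : ∀ j' < j, p (l.getD j' "") = false) :
    l.find? p = some (l.getD j "") := by
  induction l generalizing j with
  | nil => simp at hj
  | cons a l ih =>
    match j with
    | 0 => simpa using List.find?_cons_of_pos (by simpa using hp)
    | (j'' + 1) =>
      rw [List.find?_cons_of_neg (by simpa using hpre 0 (by omega))]
      simpa using ih j'' (by simpa using hj) (by simpa using hp)
        (fun j' hj' => by simpa using hpre (j' + 1) (by omega))

-- if the predicates (which depend only on the value) first disagree at index j, after agreeing
-- to skip, the two find?s differ
theorem pv_find?_ne {p q : String → Bool} (l : List String) (j : Nat) (hj : j < l.length)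
    (hne : p (l.getD j "") ≠ q (l.getD j ""))
    (hpre : ∀ j' < j, p (l.getD j' "") = false ∧ q (l.getD j' "") = false) :
    l.find? p ≠ l.find? q := by
  set x := l.getD j "" with hx
  cases hp : p x <;> cases hq : q x
  · rw [hp, hq] at hne; exact absurd rfl hne
  · have hqfind : l.find? q = some x := pv_find?_first l j hj hq (fun j' hj' => (hpre j' hj').2)
    rw [hqfind]
    intro hcon
    have := List.find?_some hcon
    rw [hp] at this
    exact Bool.false_ne_true this
  · have hpfind : l.find? p = some x := pv_find?_first l j hj hp (fun j' hj' => (hpre j' hj').1)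
    rw [hpfind]
    intro hcon
    have := List.find?_some hcon.symm
    rw [hq] at this
    exact Bool.false_ne_true this
  · rw [hp, hq] at hne; exact absurd rfl hne

theorem pv_table_norm (N : Int) (S : String) (alist : List String) :
    solve N S alist = alist.find? (fun ans => !(PySem.Set.contains (PySem.Set.ofList (pvTable N S)) ans)) := rfl

theorem solve_spec : Claim_unchanged_solve := by
  intro N S alist _
  unfold Spec_solve
  intro hnd
  rw [pv_table_norm]
  unfold solve_alt
  refine pv_walk (pvBadCand N S) (pvBothSkip N S) ?_ ?_ alist ?_
  · intro x hx
    rw [Bool.eq_iff_iff, pv_pA_iff, pv_pB_iff, not_iff_not]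
    exact pv_agree hx
  · intro x hx hq
    simp only [] at hq
    have hb : pvBSkip S x := by
      by_contra hc
      rw [← pv_pB_iff S x] at hc
      rw [hq] at hc
      exact Bool.false_ne_true hc
    have ha : pvAMem N S x := (pv_agree hx).mpr hb
    obtain ⟨h1, h3, hinf⟩ := hb
    refine ⟨h1, h3, hinf, ?_⟩
    rcases ha with ⟨hm, _⟩ | ⟨hm, _⟩ | ⟨_, _, hocc⟩
    · omega
    · exact Or.inl hm
    · exact Or.inr hocc
  · unfold D_solve at hnd
    exact hnd

theorem solve_changed : Claim_changed_solve := by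
  unfold Claim_changed_solve
  decide

theorem solve_tight : Claim_exact_solve := by
  intro N S alist _ hD
  rw [pv_table_norm]
  unfold solve_alt D_solve at *
  obtain ⟨j, hjr, hbad, hall⟩ := hD
  simp only [List.mem_range] at hjr
  apply pv_find?_ne alist j hjr
  · rw [Ne, Bool.eq_iff_iff, pv_pA_iff, pv_pB_iff, not_iff_not]
    intro hcon
    have hdis := pv_disagree hbad
    by_cases hb : pvBSkip S (alist.getD j "")
    · exact hdis.mp (hcon.mpr hb) hb
    · exact hb (hcon.mp (hdis.mpr hb))
  · intro j' hj'
    have hbs := pv_bothskip (hall j' (by simpa using hj'))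
    constructor
    · rw [← Bool.not_eq_true, pv_pA_iff, not_not]
      exact hbs.1
    · rw [← Bool.not_eq_true, pv_pB_iff, not_not]
      exact hbs.2
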